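-- pv_equiv track=rewrite | github.com/patrickfrey/strusWikipediaSearch | scripts/strusnlp_spacy.py | getTitleSubject
-- ===== SOURCE A (Python) =====
-- def splitAbbrev( name):
--     rt = []
--     while name.find('.') >= 0:
--         pi = name.index('.');
--         if pi > 0:
--             rt.append( name[ :pi+1])
--         name = name[ pi+1:]
--     if name:
--         rt.append( name)
--     return rt
--
-- def getTitleSubject( title):
--     if len(title) > 0 and title[0] == '(':
--         title = title.translate( str.maketrans( "", "", "’'\"()?!/;:"))
--     else:
--         title = title.translate( str.maketrans( "", "", "’'\"?!/;:"))
--     endtitle = title.find('(')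
--     if endtitle >= 0:
--         titleparts = title[ :endtitle ].split(' ')
--     else:
--         titleparts = title.split(' ')
--     rt = []
--     for tp in titleparts:
--         rt += splitAbbrev( tp)
--     return rt
-- ===== SOURCE B (Python) =====
-- def getTitleSubject(title):
--     drop = "\u2019'\"?!/;:" + ("()" if title.startswith('(') else "")
--     cleaned = ''.join(c for c in title if c not in drop)
--     head = cleaned.partition('(')[0]
--     out = []
--     for tok in head.split(' '):
--         parts = tok.split('.')
--         out.extend(p + '.' for p in parts[:-1] if p)
--         if parts[-1]:
--             out.append(parts[-1])
--     return out
-- ===== Notes on version B (the rewrite author's own statement) =====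
-- stated objective: simpler
-- what changed: splitAbbrev's while-loop with repeated find/index calls and slicing is replaced by a single dot-split plus a reshaping comprehension, and the two translate branches and the head cut are merged into one character filter followed by a partition.
import Mathlib
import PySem

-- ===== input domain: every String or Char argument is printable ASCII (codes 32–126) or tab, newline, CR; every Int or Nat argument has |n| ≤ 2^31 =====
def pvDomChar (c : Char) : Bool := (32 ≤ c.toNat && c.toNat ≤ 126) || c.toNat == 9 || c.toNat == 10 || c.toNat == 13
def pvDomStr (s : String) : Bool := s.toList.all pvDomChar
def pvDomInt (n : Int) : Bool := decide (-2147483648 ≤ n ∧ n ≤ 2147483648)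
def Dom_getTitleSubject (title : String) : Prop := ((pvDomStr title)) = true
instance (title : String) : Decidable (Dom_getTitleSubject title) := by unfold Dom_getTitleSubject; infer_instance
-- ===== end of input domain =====

-- B rewrites splitAbbrev's while-loop-with-slicing as one split('.') plus a reshaping
-- comprehension, and merges the two translate branches / find('(') cut into one filter +
-- partition; objective: simpler.

-- shared helper: exact port of Python's str.split(sep) for a ONE-CHARACTER separator sep = d
-- (keeps empty segments; splitting '' gives ['']); used by both ports for split(' ') and by B for split('.')
def splitCh (d : Char) : List Char → List (List Char)
  | [] => [[]]
  | c :: rest =>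
    if c = d then [] :: splitCh d rest
    else
      match splitCh d rest with
      | h :: t => (c :: h) :: t
      | [] => [[c]]   -- unreachable: splitCh never returns []

-- cited by splitAbbrevA's decreasing_by
theorem find_nonneg_ne_nil (name : List Char) (h : 0 ≤ PySem.Chars.find name ['.']) :
    name ≠ [] := by
  intro hnil
  subst hnil
  simp [PySem.Chars.find, PySem.Chars.find.go] at h

-- ===== PORT A =====
-- characters deleted by str.translate in A's two branches (a translate delete-table removes
-- exactly these code points; ported as a filter — exact)
def pvRemoveParen : List Char := ['\u2019', '\'', '"', '(', ')', '?', '!', '/', ';', ':']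
def pvRemovePlain : List Char := ['\u2019', '\'', '"', '?', '!', '/', ';', ':']

-- the while-loop of splitAbbrev, rt as accumulator; name.find('.') = name.index('.') when ≥ 0,
-- name[:pi+1] / name[pi+1:] are take / drop (bounds nonnegative)
def splitAbbrevA (name : List Char) (rt : List (List Char)) : List (List Char) :=
  let pi := PySem.Chars.find name ['.']
  if h : 0 ≤ pi then
    splitAbbrevA (name.drop (pi.toNat + 1))
      (if 0 < pi then rt ++ [name.take (pi.toNat + 1)] else rt)
  else if name = [] then rt else rt ++ [name]
termination_by name.length
decreasing_by
  have := find_nonneg_ne_nil name h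
  have : 0 < name.length := List.length_pos_iff.mpr this
  simp [List.length_drop]; omega

def getTitleSubject (title : String) : List String :=
  let t0 := title.toList
  -- len(title) > 0 and title[0] == '(' : t0[0]? is title[0] (no IndexError: guarded by the length test)
  let t := if 0 < t0.length ∧ t0[0]? = some '(' then
      t0.filter (fun c => !pvRemoveParen.contains c)
    else
      t0.filter (fun c => !pvRemovePlain.contains c)
  let endtitle := PySem.Chars.find t ['(']
  let titleparts := if 0 ≤ endtitle then splitCh ' ' (t.take endtitle.toNat) else splitCh ' ' t
  (titleparts.foldl (fun rt tp => rt ++ splitAbbrevA tp []) []).map (fun cs => String.ofList cs)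

-- ===== PORT B =====
-- parts[:-1] reshaped (keep non-empty pieces, re-attach the dot), plus parts[-1] when non-empty
def splitAbbrevB (name : List Char) : List (List Char) :=
  let parts := splitCh '.' name
  ((parts.dropLast.filter (fun p => p ≠ [])).map (fun p => p ++ ['.'])) ++
    (if parts.getLastD [] = [] then [] else [parts.getLastD []])

def getTitleSubject_alt (title : String) : List String :=
  let t := title.toList
  let dropSet := pvRemovePlain ++ (if PySem.Chars.startswith t ['('] then ['(', ')'] else [])
  let cleaned := t.filter (fun c => !dropSet.contains c)
  let head := cleaned.takeWhile (fun c => c ≠ '(')   -- cleaned.partition('(')[0]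
  ((splitCh ' ' head).flatMap splitAbbrevB).map (fun cs => String.ofList cs)

-- ===== PRECONDITION & SPEC =====
def Spec_getTitleSubject (title : String) (out : List String) : Prop := out = getTitleSubject_alt title
instance (title : String) (out : List String) : Decidable (Spec_getTitleSubject title out) := by unfold Spec_getTitleSubject; infer_instance

-- ===== CLAIM (what is proved, stated in full; the proofs are below) =====
def Claim_equal_getTitleSubject : Prop := ∀ (title : String), Dom_getTitleSubject title → Spec_getTitleSubject title (getTitleSubject title)

-- ===== LEMMAS AND PROOFS =====

theorem prefix_singleton {d : Char} {l : List Char} : [d] <+: l ↔ l.head? = some d := by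
  constructor
  · rintro ⟨t, rfl⟩; rfl
  · intro h
    cases l with
    | nil => simp at h
    | cons a t => simp at h; subst h; exact ⟨t, rfl⟩

theorem infix_singleton {d : Char} {l : List Char} : [d] <:+: l ↔ d ∈ l := by
  constructor
  · intro h; exact h.sublist.mem (by simp : d ∈ [d])
  · intro h; obtain ⟨a, b, rfl⟩ := List.mem_iff_append.mp h
    exact ⟨a, b, by simp⟩

theorem findChar_neg {cs : List Char} {d : Char} (h : ¬ 0 ≤ PySem.Chars.find cs [d]) : d ∉ cs := by
  rw [← infix_singleton]
  rw [← PySem.Chars.find_nonneg_iff]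
  exact h

theorem findChar_pos {cs : List Char} {d : Char} (h : 0 ≤ PySem.Chars.find cs [d]) :
    (PySem.Chars.find cs [d]).toNat < cs.length ∧
    cs[(PySem.Chars.find cs [d]).toNat]? = some d ∧
    ∀ i < (PySem.Chars.find cs [d]).toNat, cs[i]? ≠ some d := by
  obtain ⟨h1, h2⟩ := PySem.Chars.find_spec h
  rw [prefix_singleton, List.head?_drop] at h1
  refine ⟨?_, h1, ?_⟩
  · by_contra hlen
    push Not at hlen
    rw [List.getElem?_eq_none hlen] at h1; simp at h1
  · intro i hi
    have := h2 i hi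
    rw [prefix_singleton, List.head?_drop] at this
    exact this

theorem splitCh_ne_nil (d : Char) (l : List Char) : splitCh d l ≠ [] := by
  cases l with
  | nil => simp [splitCh]
  | cons c rest =>
    simp only [splitCh]
    split
    · simp
    · split <;> simp_all

theorem splitCh_no_sep {d : Char} {l : List Char} (h : d ∉ l) : splitCh d l = [l] := by
  induction l with
  | nil => rfl
  | cons c rest ih =>
    simp at h
    rw [splitCh, if_neg (Ne.symm h.1), ih h.2]

theorem splitCh_first {d : Char} {a b : List Char} (h : d ∉ a) :
    splitCh d (a ++ d :: b) = a :: splitCh d b := by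
  induction a with
  | nil => simp [splitCh]
  | cons c rest ih =>
    simp at h
    rw [List.cons_append, splitCh, if_neg (Ne.symm h.1), ih h.2]

theorem take_eq_takeWhile {p : Char → Bool} : ∀ (cs : List Char) (n : Nat),
    (∀ i (_ : i < n) (hi : i < cs.length), p cs[i]) →
    ∀ (h2 : n < cs.length), p cs[n] = false → cs.take n = cs.takeWhile p
  | [], n, _, h2, _ => by simp at h2
  | c :: rest, 0, _, _, h3 => by simp at h3; simp [h3]
  | c :: rest, n + 1, h1, h2, h3 => by
    have hc : p c := h1 0 (by omega) (by simp)
    simp only [List.take_succ_cons, List.takeWhile_cons, hc, if_true]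
    congr 1
    exact take_eq_takeWhile rest n (fun i hi hil => h1 (i+1) (by omega) (by simpa using hil))
      (by simpa using h2) (by simpa using h3)

theorem head_agree (cs : List Char) :
    (if 0 ≤ PySem.Chars.find cs ['('] then cs.take (PySem.Chars.find cs ['(']).toNat else cs)
      = cs.takeWhile (fun c => c ≠ '(') := by
  by_cases h : 0 ≤ PySem.Chars.find cs ['(']
  · rw [if_pos h]
    obtain ⟨hlt, hget, hbefore⟩ := findChar_pos h
    refine take_eq_takeWhile cs _ ?_ hlt ?_
    · intro i hi hil
      have := hbefore i hi
      rw [List.getElem?_eq_getElem hil] at this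
      simp at this ⊢
      intro he; exact this (by rw [he])
    · rw [List.getElem?_eq_getElem hlt] at hget
      simp at hget
      simp [hget]
  · rw [if_neg h]
    have := findChar_neg h
    symm
    rw [List.takeWhile_eq_self_iff]
    intro a ha
    simp
    intro he; subst he; exact this ha

theorem splitAbbrevB_nosep {name : List Char} (h : '.' ∉ name) :
    splitAbbrevB name = if name = [] then [] else [name] := by
  rw [splitAbbrevB, splitCh_no_sep h]
  by_cases hn : name = [] <;> simp [hn]

theorem splitAbbrevB_step {a b : List Char} (h : '.' ∉ a) :
    splitAbbrevB (a ++ '.' :: b) = (if a = [] then [] else [a ++ ['.']]) ++ splitAbbrevB b := by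
  rw [splitAbbrevB, splitAbbrevB, splitCh_first h]
  have hne := splitCh_ne_nil '.' b
  rw [List.dropLast_cons_of_ne_nil hne, List.getLastD_cons]
  have : (splitCh '.' b).getLastD a = (splitCh '.' b).getLastD [] := by
    cases hb : splitCh '.' b with
    | nil => exact absurd hb hne
    | cons x y =>
      rw [List.getLastD_eq_getLast?, List.getLastD_eq_getLast?,
        List.getLast?_eq_some_getLast (l := x :: y) (by simp)]; rfl
  rw [this]
  by_cases ha : a = [] <;> simp [ha]

theorem splitAbbrev_agree (name : List Char) (rt : List (List Char)) :
    splitAbbrevA name rt = rt ++ splitAbbrevB name := by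
  rw [splitAbbrevA]
  by_cases h : 0 ≤ PySem.Chars.find name ['.']
  · rw [dif_pos h]
    obtain ⟨hlt, hget, hbefore⟩ := findChar_pos h
    set pi := PySem.Chars.find name ['.'] with hpi
    set n := pi.toNat with hn
    have hgetn : name[n] = '.' := by
      rw [List.getElem?_eq_getElem hlt] at hget; simpa using hget
    have hnota : '.' ∉ name.take n := by
      intro hm
      obtain ⟨i, hi, hgi⟩ := List.mem_iff_getElem.mp hm
      have hin : i < n := by simp at hi; omega
      have hil : i < name.length := by omega
      rw [List.getElem_take] at hgi
      exact hbefore i hin (by rw [List.getElem?_eq_getElem hil, hgi])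
    have htake : name.take (n + 1) = name.take n ++ ['.'] := by
      rw [List.take_succ, hget]; rfl
    have hsplit : name.take n ++ '.' :: name.drop (n + 1) = name := by
      have := List.take_append_drop n name
      rw [List.drop_eq_getElem_cons hlt, hgetn] at this
      exact this
    have hiff : (name.take n = []) ↔ ¬ 0 < pi := by
      have : (name.take n).length = n := by simp; omega
      constructor
      · intro he; rw [he] at this; simp at this; omega
      · intro hp
        have : n = 0 := by omega
        simp [this]
    rw [splitAbbrev_agree (name.drop (n + 1))]
    conv_rhs => rw [← hsplit]
    rw [splitAbbrevB_step hnota]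
    by_cases hz : 0 < pi
    · rw [if_pos hz, if_neg (fun he => (hiff.mp he) hz), htake]
      simp
    · rw [if_neg hz, if_pos (hiff.mpr hz)]
      simp
  · rw [dif_neg h]
    have hno : '.' ∉ name := findChar_neg h
    rw [splitAbbrevB_nosep hno]
    by_cases hn : name = [] <;> simp [hn]
termination_by name.length
decreasing_by
  have := find_nonneg_ne_nil name h
  have : 0 < name.length := List.length_pos_iff.mpr this
  simp [List.length_drop]; omega

theorem drop_set_agree (c : Char) :
    (pvRemovePlain ++ ['(', ')']).contains c = pvRemoveParen.contains c := by
  have : ∀ a b : Bool, a = b ↔ (a ↔ b) := by decide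
  simp [pvRemovePlain, pvRemoveParen]
  rw [this]
  simp
  tauto

theorem cond_agree (t : List Char) :
    PySem.Chars.startswith t ['('] = true ↔ (0 < t.length ∧ t[0]? = some '(') := by
  rw [PySem.Chars.startswith_iff, prefix_singleton]
  cases t <;> simp

theorem filter_agree (t : List Char) :
    (if 0 < t.length ∧ t[0]? = some '(' then
        t.filter (fun c => !pvRemoveParen.contains c)
      else t.filter (fun c => !pvRemovePlain.contains c))
    = t.filter (fun c =>
        !(pvRemovePlain ++ (if PySem.Chars.startswith t ['('] then ['(', ')'] else [])).contains c) := by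
  by_cases h : PySem.Chars.startswith t ['('] = true
  · rw [if_pos h, if_pos (cond_agree t |>.mp h)]
    exact List.filter_congr (fun c _ => by rw [drop_set_agree])
  · rw [if_neg (fun hc => h ((cond_agree t).mpr hc))]
    simp only [Bool.not_eq_true] at h
    rw [h]
    simp

theorem foldl_splitAbbrev (l : List (List Char)) (acc : List (List Char)) :
    l.foldl (fun rt tp => rt ++ splitAbbrevA tp []) acc = acc ++ l.flatMap splitAbbrevB := by
  induction l generalizing acc with
  | nil => simp
  | cons x xs ih => simp [List.foldl_cons, ih, splitAbbrev_agree x []]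

-- ===== VERDICT (by name: the statement is the Claim_ definition above) =====
theorem getTitleSubject_spec : Claim_equal_getTitleSubject := by
  intro title _
  unfold Spec_getTitleSubject getTitleSubject getTitleSubject_alt
  simp only []
  rw [filter_agree]
  rw [← apply_ite (splitCh ' '), head_agree]
  congr 1
  rw [foldl_splitAbbrev]
  simp
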